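-- pv_equiv track=rewrite | github.com/Airheumatologist/cleaningestion | src/specialty_journals.py | _contains_phrase
-- ===== SOURCE A (Python) =====
-- def _contains_phrase(tokens: list[str], phrase_tokens: tuple[str, ...]) -> bool:
--     if not tokens or not phrase_tokens:
--         return False
--     phrase_len = len(phrase_tokens)
--     if phrase_len > len(tokens):
--         return False
--     for idx in range(len(tokens) - phrase_len + 1):
--         if tuple(tokens[idx:idx + phrase_len]) == phrase_tokens:
--             return True
--     return False
-- ===== SOURCE B (Python) =====
-- def _contains_phrase(tokens: list[str], phrase_tokens: tuple[str, ...]) -> bool: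
--     # Rolling-fingerprint scan: precompute a cheap integer hash per token, keep a
--     # running window sum, and only do the O(m) window comparison when the sums agree.
--     m = len(phrase_tokens)
--     n = len(tokens)
--     if m == 0 or m > n:
--         return False
--
--     def h(s):
--         total = 0
--         for c in s:
--             total += ord(c)
--         return total
--
--     hs = [h(t) for t in tokens]
--     target = 0
--     for t in phrase_tokens:
--         target += h(t)
--     phrase = list(phrase_tokens)
--     window = 0
--     for v in hs[:m]:
--         window += v
--     for i in range(n - m + 1):
--         if i > 0:
--             window += hs[i + m - 1] - hs[i - 1]
--         if window == target and tokens[i:i + m] == phrase: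
--             return True
--     return False
-- ===== Notes on version B (the rewrite author's own statement) =====
-- stated objective: alternative
-- what changed: Replaces the per-position tuple-slice comparison with a rolling window-sum fingerprint over precomputed per-token hashes, doing the full window comparison only when fingerprints agree.
import Mathlib
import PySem

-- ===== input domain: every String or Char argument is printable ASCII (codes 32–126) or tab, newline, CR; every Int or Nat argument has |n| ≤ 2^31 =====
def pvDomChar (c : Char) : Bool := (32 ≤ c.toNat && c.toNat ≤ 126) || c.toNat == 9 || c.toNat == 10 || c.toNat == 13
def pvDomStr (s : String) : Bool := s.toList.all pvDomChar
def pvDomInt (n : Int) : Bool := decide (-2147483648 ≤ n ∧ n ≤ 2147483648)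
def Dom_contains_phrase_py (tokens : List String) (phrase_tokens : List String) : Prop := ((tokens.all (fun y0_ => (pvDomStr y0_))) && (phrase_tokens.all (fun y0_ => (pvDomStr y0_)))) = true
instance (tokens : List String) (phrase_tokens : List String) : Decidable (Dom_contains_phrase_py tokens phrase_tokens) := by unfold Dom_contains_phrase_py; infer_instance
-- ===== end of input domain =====

-- B replaces A's per-position tuple-slice comparison by a rolling window-sum
-- fingerprint over precomputed per-token hashes (full compare only on fingerprint hit).


-- ===== PORT A =====
def contains_phrase_py (tokens : List String) (phrase_tokens : List String) : Bool :=
  if tokens = [] ∨ phrase_tokens = [] then false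
  else
    let phrase_len : Int := phrase_tokens.length
    if phrase_len > (tokens.length : Int) then false
    else
      -- 'for idx in range(…): if …: return True' with a pure body = any over the range
      (PySem.List.pyRange 0 ((tokens.length : Int) - phrase_len + 1) 1).any
        (fun idx => decide (PySem.List.slice tokens (some idx) (some (idx + phrase_len)) = phrase_tokens))

-- ===== PORT B =====
-- h(s): sum of ord of the characters of s
def pvHash (s : String) : Int := s.toList.foldl (fun total c => total + (c.toNat : Int)) 0

-- hs[i] for an index known (at call sites) to be in range; default never used
def pvIdx (xs : List Int) (i : Int) : Int := (PySem.List.pyGet? xs i).getD 0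

-- the 'for i in range(n - m + 1)' loop of B, with the running window sum as state
def pvLoopB (tokens : List String) (hs : List Int) (phrase : List String)
    (target m : Int) : List Int → Int → Bool
  | [], _ => false
  | i :: rest, window =>
    let w := if 0 < i then window + pvIdx hs (i + m - 1) - pvIdx hs (i - 1) else window
    if w = target ∧ PySem.List.slice tokens (some i) (some (i + m)) = phrase then true
    else pvLoopB tokens hs phrase target m rest w

def contains_phrase_py_alt (tokens : List String) (phrase_tokens : List String) : Bool :=
  let m : Int := phrase_tokens.length
  let n : Int := tokens.length
  if m = 0 ∨ m > n then false
  else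
    let hs := tokens.map pvHash
    let target := phrase_tokens.foldl (fun acc t => acc + pvHash t) 0
    let window := (PySem.List.slice hs none (some m)).foldl (fun acc v => acc + v) 0
    pvLoopB tokens hs phrase_tokens target m (PySem.List.pyRange 0 (n - m + 1) 1) window

-- ===== PRECONDITION & SPEC =====
def Spec_contains_phrase_py (tokens : List String) (phrase_tokens : List String) (out : Bool) : Prop := out = contains_phrase_py_alt tokens phrase_tokens
instance (tokens : List String) (phrase_tokens : List String) (out : Bool) : Decidable (Spec_contains_phrase_py tokens phrase_tokens out) := by unfold Spec_contains_phrase_py; infer_instance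

-- ===== CLAIM (what is proved, stated in full; the proofs are below) =====
def Claim_equal_contains_phrase_py : Prop := ∀ (tokens : List String) (phrase_tokens : List String), Dom_contains_phrase_py tokens phrase_tokens → Spec_contains_phrase_py tokens phrase_tokens (contains_phrase_py tokens phrase_tokens)

-- ===== LEMMAS AND PROOFS =====

-- window sum of the m tokens starting at i (in the hash list)
def pvWsum (hs : List Int) (i m : Int) : Int :=
  (PySem.List.slice hs (some i) (some (i + m))).sum

lemma pvSlice_map (f : String → Int) (xs : List String) (a b : Int) (ha : 0 ≤ a) (hb : 0 ≤ b) :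
    PySem.List.slice (xs.map f) (some a) (some b) = (PySem.List.slice xs (some a) (some b)).map f := by
  rw [PySem.List.slice_toNat xs ha hb, PySem.List.slice_toNat (xs.map f) ha hb]
  simp [List.map_drop, List.map_take]

-- fingerprint soundness: equal windows have equal window sums
lemma pvWsum_of_slice_eq (tokens phrase : List String) (i m : Int) (hi : 0 ≤ i) (hm : 0 ≤ m)
    (h : PySem.List.slice tokens (some i) (some (i + m)) = phrase) :
    pvWsum (tokens.map pvHash) i m = (phrase.map pvHash).sum := by
  unfold pvWsum
  rw [pvSlice_map pvHash tokens i (i + m) hi (by omega), h]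

-- the rolling update: wsum (i) from wsum (i-1)
lemma pvWsum_succ (hs : List Int) (i m : Int) (hm : 1 ≤ m) (hi : 1 ≤ i)
    (hn : i + m ≤ (hs.length : Int)) :
    pvWsum hs i m = pvWsum hs (i - 1) m + pvIdx hs (i + m - 1) - pvIdx hs (i - 1) := by
  unfold pvWsum pvIdx
  obtain ⟨k, hk⟩ : ∃ k : ℕ, m = (k : Int) := ⟨m.toNat, by omega⟩
  obtain ⟨a, ha⟩ : ∃ a : ℕ, i = (a : Int) + 1 := ⟨(i - 1).toNat, by omega⟩
  subst hk; subst ha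
  have h4 : ((a : ℤ) + 1) + (k : ℤ) - 1 = (((a + k) : ℕ) : Int) := by push_cast; ring
  have h3 : ((a : ℤ) + 1) - 1 + (k : ℤ) = (((a + k) : ℕ) : Int) := by push_cast; ring
  have h1 : ((a : ℤ) + 1) + (k : ℤ) = (((a + 1 + k) : ℕ) : Int) := by push_cast; ring
  have h2 : ((a : ℤ) + 1) - 1 = ((a : ℕ) : Int) := by push_cast; ring
  have h0 : ((a : ℤ) + 1) = (((a + 1) : ℕ) : Int) := by push_cast; ring
  rw [h4, h3, h1, h2, h0, PySem.List.slice_natCast, PySem.List.slice_natCast]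
  have hk : 1 ≤ k := by exact_mod_cast hm
  have hlen : a + 1 + k ≤ hs.length := by exact_mod_cast hn
  have e1 : a + 1 + k - (a + 1) = k := by omega
  have e2 : a + k - a = k := by omega
  rw [e1, e2]
  -- drop a = hs[a] :: drop (a+1); take k of the former
  have hd : hs.drop a = hs[a] :: hs.drop (a + 1) := by
    rw [List.drop_eq_getElem_cons (by omega)]
  have hpa : PySem.List.pyGet? hs ((a : ℕ) : Int) = some hs[a] := by
    rw [PySem.List.pyGet?_natCast]
    exact List.getElem?_eq_getElem (by omega)
  have hpb : PySem.List.pyGet? hs ((((a + k) : ℕ)) : Int) = some hs[a + k] := by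
    rw [PySem.List.pyGet?_natCast]
    exact List.getElem?_eq_getElem (by omega)
  rw [hpa, hpb, hd]
  -- take k (x :: l) = x :: take (k-1) l ; and take k (drop (a+1)) = take (k-1) (drop (a+1)) ++ [hs[a+k]]
  obtain ⟨k', rfl⟩ : ∃ k', k = k' + 1 := ⟨k - 1, by omega⟩
  rw [List.take_succ_cons]
  have ht : (hs.drop (a + 1)).take (k' + 1) = (hs.drop (a + 1)).take k' ++ [hs[a + 1 + k']] := by
    rw [List.take_succ]
    have : (hs.drop (a + 1))[k']? = some hs[a + 1 + k'] := by
      rw [List.getElem?_drop]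
      exact List.getElem?_eq_getElem (by omega)
    rw [this]
    rfl
  rw [ht]
  have hgx : hs[a + (k' + 1)] = hs[a + 1 + k'] := by congr 1; omega
  rw [hgx]
  simp only [List.sum_append, List.sum_cons, List.sum_nil, Option.getD_some]
  ring

-- main loop lemma: with the correct window sum as state, B's loop is A's any-scan
lemma pvLoopB_eq_any (tokens : List String) (phrase : List String) (m : Int)
    (hm : 1 ≤ m) (hmn : m ≤ (tokens.length : Int)) :
    ∀ (fuel : ℕ) (lo window : Int), 0 ≤ lo →
      ((tokens.length : Int) - m + 1 - lo).toNat ≤ fuel →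
      window = (if lo = 0 then pvWsum (tokens.map pvHash) 0 m else pvWsum (tokens.map pvHash) (lo - 1) m) →
      pvLoopB tokens (tokens.map pvHash) phrase ((phrase.map pvHash).sum) m
          (PySem.List.pyRange lo ((tokens.length : Int) - m + 1) 1) window
        = (PySem.List.pyRange lo ((tokens.length : Int) - m + 1) 1).any
            (fun idx => decide (PySem.List.slice tokens (some idx) (some (idx + m)) = phrase)) := by
  intro fuel
  induction fuel with
  | zero =>
    intro lo window hlo hfuel _
    have hend : (tokens.length : Int) - m + 1 ≤ lo := by omega
    rw [PySem.List.pyRange_one_eq_nil hend]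
    rfl
  | succ f ih =>
    intro lo window hlo hfuel hwin
    by_cases hend : (tokens.length : Int) - m + 1 ≤ lo
    · rw [PySem.List.pyRange_one_eq_nil hend]; rfl
    · push_neg at hend
      rw [PySem.List.pyRange_one_cons hend]
      set hs := tokens.map pvHash with hhs
      have hlen : (hs.length : Int) = (tokens.length : Int) := by simp [hhs]
      have hw : (if 0 < lo then window + pvIdx hs (lo + m - 1) - pvIdx hs (lo - 1) else window)
          = pvWsum hs lo m := by
        by_cases h0 : 0 < lo
        · rw [if_pos h0]
          have := pvWsum_succ hs lo m hm (by omega) (by omega)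
          rw [hwin, if_neg (by omega)]
          omega
        · rw [if_neg h0]
          have : lo = 0 := by omega
          subst this
          rw [hwin, if_pos rfl]
      show pvLoopB tokens hs phrase ((phrase.map pvHash).sum) m (lo :: _) window = _
      rw [pvLoopB, hw]
      by_cases hp : PySem.List.slice tokens (some lo) (some (lo + m)) = phrase
      · have hsum : pvWsum hs lo m = (phrase.map pvHash).sum :=
          pvWsum_of_slice_eq tokens phrase lo m hlo (by omega) hp
        rw [if_pos ⟨hsum, hp⟩]
        simp [hp]
      · have : ¬ (pvWsum hs lo m = (phrase.map pvHash).sum ∧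
            PySem.List.slice tokens (some lo) (some (lo + m)) = phrase) := by
          intro ⟨_, h⟩; exact hp h
        rw [if_neg this]
        rw [List.any_cons]
        simp only [hp, decide_false, Bool.false_or]
        exact ih (lo + 1) (pvWsum hs lo m) (by omega) (by omega)
          (by rw [if_neg (by omega)]; norm_num)

-- the initial window: sum of hs[:m] = wsum 0
lemma pvWindow_init (hs : List Int) (m : Int) (hm : 0 ≤ m) :
    (PySem.List.slice hs none (some m)).foldl (fun acc v => acc + v) 0 = pvWsum hs 0 m := by
  unfold pvWsum
  rw [zero_add]
  simp only [PySem.List.slice_zero_start]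
  rw [PySem.List.slice_to hs hm]
  simpa using PySem.List.foldl_add (l := hs.take m.toNat) (a := 0) (g := id)

-- target = sum of hashes of the phrase
lemma pvTarget_eq (phrase : List String) :
    phrase.foldl (fun acc t => acc + pvHash t) 0 = (phrase.map pvHash).sum := by
  simpa using PySem.List.foldl_add (l := phrase) (a := 0) (g := pvHash)

-- ===== VERDICT (by name: the statement is the Claim_ definition above) =====
theorem contains_phrase_py_spec : Claim_equal_contains_phrase_py := by
  intro tokens phrase _
  unfold Spec_contains_phrase_py contains_phrase_py contains_phrase_py_alt
  by_cases hg : tokens = [] ∨ phrase = []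
  · rw [if_pos hg]
    rcases hg with h | h
    · subst h
      by_cases hp : (phrase.length : Int) = 0
      · simp [hp]
      · rw [if_pos (Or.inr (by simp only [List.length_nil, Nat.cast_zero]; omega))]
    · subst h
      simp
  · rw [if_neg hg]
    push_neg at hg
    obtain ⟨ht, hp⟩ := hg
    have hm : 1 ≤ (phrase.length : Int) := by
      have : phrase.length ≠ 0 := fun h => hp (List.length_eq_zero_iff.mp h)
      omega
    by_cases hmn : (phrase.length : Int) > (tokens.length : Int)
    · rw [if_pos hmn, if_pos (Or.inr hmn)]
    · push_neg at hmn
      rw [if_neg (by omega), if_neg (by push_neg; constructor <;> omega)]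
      dsimp only []
      rw [pvTarget_eq, pvWindow_init (tokens.map pvHash) (phrase.length : Int) (by omega)]
      exact (pvLoopB_eq_any tokens phrase (phrase.length : Int) hm hmn
        ((tokens.length : Int) - (phrase.length : Int) + 1).toNat 0
        (pvWsum (tokens.map pvHash) 0 (phrase.length : Int)) le_rfl (by omega)
        (by rw [if_pos rfl])).symm
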